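-- pv_equiv track=rewrite | github.com/komapc/ido-esperanto-extractor | apply_final_filters.py | has_ido_grammatical_ending
-- ===== SOURCE A (Python) =====
-- def has_ido_grammatical_ending(word: str) -> bool:
--     """Check if word has proper Ido grammatical ending."""
--     # Ido grammatical endings
--     endings = [
--         'o', 'i',           # noun (sg, pl)
--         'on', 'in',         # noun accusative (sg, pl)
--         'a',                # adjective
--         'e',                # adverb
--         'ar', 'ir', 'or',   # verb infinitive
--         'as', 'is', 'os', 'us', 'ez',  # verb conjugations
--     ]
--
--     word_lower = word.lower()
--
--     # Check if ends with any Ido ending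
--     for ending in endings:
--         if word_lower.endswith(ending):
--             # Make sure it's not just the ending (word should be longer)
--             if len(word) > len(ending) + 1:
--                 return True
--
--     # Special case: compound words with hyphens
--     # Check if last part has Ido ending
--     if '-' in word:
--         parts = word.split('-')
--         last_part = parts[-1].lower()
--         for ending in endings:
--             if last_part.endswith(ending) and len(last_part) > len(ending) + 1:
--                 return True
--
--     return False
-- ===== SOURCE B (Python) =====
-- # Trie of REVERSED Ido endings: char -> (is_end_of_ending, children).
-- _TRIE = {
--     'o': (True, {}),
--     'i': (True, {}),
--     'a': (True, {}),
--     'e': (True, {}),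
--     'n': (False, {'o': (True, {}), 'i': (True, {})}),
--     'r': (False, {'a': (True, {}), 'i': (True, {}), 'o': (True, {})}),
--     's': (False, {'a': (True, {}), 'i': (True, {}), 'o': (True, {}), 'u': (True, {})}),
--     'z': (False, {'e': (True, {})}),
-- }
--
--
-- def _matches(s: str) -> bool:
--     """Walk s back-to-front through the trie of reversed endings; accept when an
--     ending node is reached and the string is longer than the ending plus one."""
--     n = len(s)
--     children = _TRIE
--     depth = 0
--     for ch in reversed(s):
--         node = children.get(ch)
--         if node is None:
--             return False
--         depth += 1
--         if node[0] and n > depth + 1: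
--             return True
--         children = node[1]
--     return False
--
--
-- def has_ido_grammatical_ending(word: str) -> bool:
--     """Check if word has proper Ido grammatical ending."""
--     if _matches(word.lower()):
--         return True
--     return '-' in word and _matches(word.split('-')[-1].lower())
-- ===== Notes on version B (the rewrite author's own statement) =====
-- stated objective: alternative
-- what changed: Replaces A's loop of 14 endswith scans (run on the word and again on the last hyphen part) by a single back-to-front walk of the string through a trie of reversed endings, accepting when an ending node is reached with enough characters before it.
import Mathlib
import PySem

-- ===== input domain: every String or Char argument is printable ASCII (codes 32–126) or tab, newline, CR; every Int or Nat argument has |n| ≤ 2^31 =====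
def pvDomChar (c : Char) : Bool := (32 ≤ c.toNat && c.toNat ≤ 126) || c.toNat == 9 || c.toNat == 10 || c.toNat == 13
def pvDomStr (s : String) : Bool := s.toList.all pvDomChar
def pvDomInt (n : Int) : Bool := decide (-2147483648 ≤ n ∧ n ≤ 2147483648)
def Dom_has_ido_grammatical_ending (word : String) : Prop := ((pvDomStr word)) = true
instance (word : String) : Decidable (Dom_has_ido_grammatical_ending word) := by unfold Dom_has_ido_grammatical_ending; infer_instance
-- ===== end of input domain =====

-- B replaces A's repeated endswith scan over the 14-element endings list by a single
-- back-to-front walk of the word through a trie of reversed endings; objective: alternative.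

-- ===== PORT A =====
-- the 'endings' list literal of A
def pvEndingsA : List (List Char) :=
  [['o'], ['i'], ['o','n'], ['i','n'], ['a'], ['e'], ['a','r'], ['i','r'], ['o','r'],
   ['a','s'], ['i','s'], ['o','s'], ['u','s'], ['e','z']]

-- A's 'for ending in endings: if endswith and len > len(ending)+1: return True' loop
-- (n is the length Python tests: len(word) in the first loop, len(last_part) in the second)
def pvLoopA (s : List Char) (n : Nat) : List (List Char) → Bool
  | [] => false
  | e :: rest =>
    if PySem.Chars.endswith s e && decide (n > e.length + 1) then true else pvLoopA s n rest

def has_ido_grammatical_ending (word : String) : Bool :=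
  let word_lower := PySem.Chars.lower word.toList
  if pvLoopA word_lower word.toList.length pvEndingsA then true
  else if PySem.Chars.isIn ['-'] word.toList then
    -- parts[-1]: split always returns a non-empty list, so the .getD [] default is unreachable
    let parts := PySem.Chars.splitOn word.toList ['-']
    let last_part := PySem.Chars.lower ((PySem.List.pyGet? parts (-1)).getD [])
    pvLoopA last_part last_part.length pvEndingsA
  else false

-- ===== PORT B =====
-- Source B's nested-dict trie literal, in an index encoding (Lean has no nested
-- inductive/heterogeneous dicts): node j = pvTrie[j] = (is_end_of_ending, children
-- as a dict from char to node index). pvRootB is Source B's top-level _TRIE dict.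
def pvTrie : List (Bool × PySem.Dict Char Nat) :=
  [ (true,  PySem.Dict.mk []),                                            -- 0  'o'
    (true,  PySem.Dict.mk []),                                            -- 1  'i'
    (true,  PySem.Dict.mk []),                                            -- 2  'a'
    (true,  PySem.Dict.mk []),                                            -- 3  'e'
    (false, PySem.Dict.mk [('o', 8), ('i', 9)]),                          -- 4  'n'
    (false, PySem.Dict.mk [('a', 10), ('i', 11), ('o', 12)]),             -- 5  'r'
    (false, PySem.Dict.mk [('a', 13), ('i', 14), ('o', 15), ('u', 16)]),  -- 6  's'
    (false, PySem.Dict.mk [('e', 17)]),                                   -- 7  'z'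
    (true, PySem.Dict.mk []), (true, PySem.Dict.mk []),                   -- 8  'on', 9 'in'
    (true, PySem.Dict.mk []), (true, PySem.Dict.mk []), (true, PySem.Dict.mk []),   -- ar ir or
    (true, PySem.Dict.mk []), (true, PySem.Dict.mk []), (true, PySem.Dict.mk []), (true, PySem.Dict.mk []),  -- as is os us
    (true, PySem.Dict.mk []) ]                                            -- 17 'ez'

def pvRootB : PySem.Dict Char Nat :=
  PySem.Dict.mk [('o', 0), ('i', 1), ('a', 2), ('e', 3), ('n', 4), ('r', 5), ('s', 6), ('z', 7)]

def pvNodeB (j : Nat) : Bool × PySem.Dict Char Nat := pvTrie.getD j (false, PySem.Dict.mk [])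

-- Source B's _matches loop: 'for ch in reversed(s): node = children.get(ch); ...'
-- (depth is the number of characters consumed before the current one)
def pvWalkB (n : Nat) (children : PySem.Dict Char Nat) (depth : Nat) : List Char → Bool
  | [] => false
  | c :: rest =>
    match children.get? c with
    | none => false
    | some j =>
      if (pvNodeB j).1 && decide (n > (depth + 1) + 1) then true
      else pvWalkB n (pvNodeB j).2 (depth + 1) rest

def pvMatchesB (s : List Char) : Bool := pvWalkB s.length pvRootB 0 s.reverse

def has_ido_grammatical_ending_alt (word : String) : Bool :=
  if pvMatchesB (PySem.Chars.lower word.toList) then true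
  else PySem.Chars.isIn ['-'] word.toList &&
       pvMatchesB (PySem.Chars.lower
         ((PySem.List.pyGet? (PySem.Chars.splitOn word.toList ['-']) (-1)).getD []))

-- ===== PRECONDITION & SPEC =====
def Spec_has_ido_grammatical_ending (word : String) (out : Bool) : Prop := out = has_ido_grammatical_ending_alt word
instance (word : String) (out : Bool) : Decidable (Spec_has_ido_grammatical_ending word out) := by unfold Spec_has_ido_grammatical_ending; infer_instance

-- ===== CLAIM (what is proved, stated in full; the proofs are below) =====
def Claim_equal_has_ido_grammatical_ending : Prop := ∀ (word : String), Dom_has_ido_grammatical_ending word → Spec_has_ido_grammatical_ending word (has_ido_grammatical_ending word)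

-- ===== LEMMAS AND PROOFS =====

-- a 1-char suffix check on a list of length ≥ 2 only reads the last element
theorem pv_es1 (s : List Char) (b a c : Char) :
    PySem.Chars.endswith (s ++ [b, a]) [c] = (a == c) := by
  simp [PySem.Chars.endswith, List.isSuffixOf, List.isPrefixOf, eq_comm]

-- a 2-char suffix check on a list of length ≥ 2 only reads the last two elements
theorem pv_es2 (s : List Char) (b a c d : Char) :
    PySem.Chars.endswith (s ++ [b, a]) [c, d] = (b == c && a == d) := by
  simp only [PySem.Chars.endswith, List.isSuffixOf, List.reverse_append]
  simp [List.isPrefixOf, Bool.and_comm, BEq.comm]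

-- a walk standing at a leaf (no children) rejects whatever input remains
theorem pvWalkB_leaf (n d : Nat) (t : List Char) :
    pvWalkB n (PySem.Dict.mk []) d t = false := by
  cases t <;> simp [pvWalkB, PySem.Dict.get?]

-- the heart, two-character tail: A's endings loop equals B's trie walk (any n)
theorem pv_main (u : List Char) (b a : Char) (n : Nat) :
    pvLoopA (u ++ [b, a]) n pvEndingsA = pvWalkB n pvRootB 0 (a :: b :: u.reverse) := by
  by_cases h1 : a = 'o'
  · subst h1
    simp [pvLoopA, pvEndingsA, pv_es1, pv_es2, pvWalkB, pvRootB, pvNodeB, pvTrie,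
      PySem.Dict.get?]
  by_cases h2 : a = 'i'
  · subst h2
    simp [pvLoopA, pvEndingsA, pv_es1, pv_es2, pvWalkB, pvRootB, pvNodeB, pvTrie,
      PySem.Dict.get?]
  by_cases h3 : a = 'a'
  · subst h3
    simp [pvLoopA, pvEndingsA, pv_es1, pv_es2, pvWalkB, pvRootB, pvNodeB, pvTrie,
      PySem.Dict.get?]
  by_cases h4 : a = 'e'
  · subst h4
    simp [pvLoopA, pvEndingsA, pv_es1, pv_es2, pvWalkB, pvRootB, pvNodeB, pvTrie,
      PySem.Dict.get?]
  by_cases h5 : a = 'n'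
  · subst h5
    by_cases g1 : b = 'o'
    · subst g1
      simp [pvLoopA, pvEndingsA, pv_es1, pv_es2, pvWalkB, pvRootB, pvNodeB, pvTrie,
        PySem.Dict.get?, pvWalkB_leaf]
    by_cases g2 : b = 'i'
    · subst g2
      simp [pvLoopA, pvEndingsA, pv_es1, pv_es2, pvWalkB, pvRootB, pvNodeB, pvTrie,
        PySem.Dict.get?, pvWalkB_leaf]
    · simp [pvLoopA, pvEndingsA, pv_es1, pv_es2, pvWalkB, pvRootB, pvNodeB, pvTrie,
        PySem.Dict.get?,
        g1, Ne.symm g1, g2, Ne.symm g2]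
  by_cases h6 : a = 'r'
  · subst h6
    by_cases g1 : b = 'a'
    · subst g1
      simp [pvLoopA, pvEndingsA, pv_es1, pv_es2, pvWalkB, pvRootB, pvNodeB, pvTrie,
        PySem.Dict.get?, pvWalkB_leaf]
    by_cases g2 : b = 'i'
    · subst g2
      simp [pvLoopA, pvEndingsA, pv_es1, pv_es2, pvWalkB, pvRootB, pvNodeB, pvTrie,
        PySem.Dict.get?, pvWalkB_leaf]
    by_cases g3 : b = 'o'
    · subst g3
      simp [pvLoopA, pvEndingsA, pv_es1, pv_es2, pvWalkB, pvRootB, pvNodeB, pvTrie,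
        PySem.Dict.get?, pvWalkB_leaf]
    · simp [pvLoopA, pvEndingsA, pv_es1, pv_es2, pvWalkB, pvRootB, pvNodeB, pvTrie,
        PySem.Dict.get?,
        g1, Ne.symm g1, g2, Ne.symm g2, g3, Ne.symm g3]
  by_cases h7 : a = 's'
  · subst h7
    by_cases g1 : b = 'a'
    · subst g1
      simp [pvLoopA, pvEndingsA, pv_es1, pv_es2, pvWalkB, pvRootB, pvNodeB, pvTrie,
        PySem.Dict.get?, pvWalkB_leaf]
    by_cases g2 : b = 'i'
    · subst g2
      simp [pvLoopA, pvEndingsA, pv_es1, pv_es2, pvWalkB, pvRootB, pvNodeB, pvTrie,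
        PySem.Dict.get?, pvWalkB_leaf]
    by_cases g3 : b = 'o'
    · subst g3
      simp [pvLoopA, pvEndingsA, pv_es1, pv_es2, pvWalkB, pvRootB, pvNodeB, pvTrie,
        PySem.Dict.get?, pvWalkB_leaf]
    by_cases g4 : b = 'u'
    · subst g4
      simp [pvLoopA, pvEndingsA, pv_es1, pv_es2, pvWalkB, pvRootB, pvNodeB, pvTrie,
        PySem.Dict.get?, pvWalkB_leaf]
    · simp [pvLoopA, pvEndingsA, pv_es1, pv_es2, pvWalkB, pvRootB, pvNodeB, pvTrie,
        PySem.Dict.get?,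
        g1, Ne.symm g1, g2, Ne.symm g2, g3, Ne.symm g3, g4, Ne.symm g4]
  by_cases h8 : a = 'z'
  · subst h8
    by_cases g1 : b = 'e'
    · subst g1
      simp [pvLoopA, pvEndingsA, pv_es1, pv_es2, pvWalkB, pvRootB, pvNodeB, pvTrie,
        PySem.Dict.get?, pvWalkB_leaf]
    · simp [pvLoopA, pvEndingsA, pv_es1, pv_es2, pvWalkB, pvRootB, pvNodeB, pvTrie,
        PySem.Dict.get?, g1, Ne.symm g1]
  · simp [pvLoopA, pvEndingsA, pv_es1, pv_es2, pvWalkB, pvRootB,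
      PySem.Dict.get?,
      h1, Ne.symm h1, h2, Ne.symm h2, h3, Ne.symm h3, h4, Ne.symm h4,
      h5, Ne.symm h5, h6, Ne.symm h6, h7, Ne.symm h7, h8, Ne.symm h8]

-- A's endings loop (with n = the length of s) equals B's trie-walk predicate
theorem pv_loop_eq_walk (s : List Char) :
    pvLoopA s s.length pvEndingsA = pvMatchesB s := by
  induction s using List.reverseRecOn with
  | nil => decide
  | append_singleton t a ih =>
    clear ih
    induction t using List.reverseRecOn with
    | nil =>
      have hA : pvLoopA [a] 1 pvEndingsA = false := by
        simp [pvLoopA, pvEndingsA, PySem.Chars.endswith, List.isSuffixOf, List.isPrefixOf]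
      have hB : pvMatchesB [a] = false := by
        simp only [pvMatchesB, List.reverse_singleton, List.length_singleton]
        cases h : pvRootB.get? a with
        | none => simp [pvWalkB, h]
        | some j => simp [pvWalkB, h]
      simpa [hA] using hB.symm
    | append_singleton u b ih =>
      clear ih
      rw [show u ++ [b] ++ [a] = u ++ [b, a] from by simp]
      simp only [pvMatchesB, List.reverse_append, List.reverse_cons, List.reverse_nil,
        List.nil_append, List.cons_append, List.length_append, List.length_cons,
        List.length_nil]
      exact pv_main u b a _

-- ===== VERDICT (by name: the statement is the Claim_ definition above) =====
theorem has_ido_grammatical_ending_spec : Claim_equal_has_ido_grammatical_ending := by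
  intro word _
  unfold Spec_has_ido_grammatical_ending
  have hlen : word.toList.length = (PySem.Chars.lower word.toList).length := by
    simp [PySem.Chars.lower]
  simp only [has_ido_grammatical_ending, has_ido_grammatical_ending_alt, hlen,
    pv_loop_eq_walk]
  cases pvMatchesB (PySem.Chars.lower word.toList) <;>
    cases PySem.Chars.isIn ['-'] word.toList <;> simp
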